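-- pv_equiv track=rewrite | github.com/seoy316/programmers | 프로그래머스/2/138476. 귤 고르기/귤 고르기.py | solution
-- ===== SOURCE A (Python) =====
-- from collections import Counter
--
-- def solution(k, tangerine):
--     count = Counter(tangerine)
--
--     sorted_count = sorted(count.values(), reverse=True)
--
--     selected_count = 0
--     varieties = 0
--
--     for c in sorted_count:
--         selected_count += c
--         varieties += 1
--         if selected_count >= k:
--             break
--
--     return varieties
-- ===== SOURCE B (Python) =====
-- from collections import Counter
-- from itertools import accumulate
-- from bisect import bisect_left
--
--
-- def solution(k, tangerine):
--     prefix = list(accumulate(sorted(Counter(tangerine).values(), reverse=True)))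
--     return min(bisect_left(prefix, k) + 1, len(prefix))
-- ===== Notes on version B (the rewrite author's own statement) =====
-- stated objective: alternative
-- what changed: Replaces A's linear scan-with-break over the sorted counts by a prefix-sum list (itertools.accumulate) plus a binary search (bisect_left) for the first cumulative total >= k, clamped to len(prefix) so the no-break and empty cases match.
import Mathlib
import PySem

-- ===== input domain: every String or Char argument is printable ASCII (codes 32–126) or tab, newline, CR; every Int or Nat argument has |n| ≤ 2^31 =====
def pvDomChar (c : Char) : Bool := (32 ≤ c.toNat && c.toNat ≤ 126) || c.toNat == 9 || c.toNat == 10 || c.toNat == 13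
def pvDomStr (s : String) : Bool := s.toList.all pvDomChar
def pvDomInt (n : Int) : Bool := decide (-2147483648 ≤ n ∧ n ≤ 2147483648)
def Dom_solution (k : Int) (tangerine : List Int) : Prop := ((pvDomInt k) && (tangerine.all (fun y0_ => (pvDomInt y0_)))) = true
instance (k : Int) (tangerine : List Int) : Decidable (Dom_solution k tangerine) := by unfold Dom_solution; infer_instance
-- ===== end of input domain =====

-- B replaces A's linear break-on-threshold scan by accumulate + bisect_left on the prefix sums (alternative algorithm, same asymptotic cost).

-- ===== PORT A =====
-- the for-loop with break: state (selected_count, varieties)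
def solLoopA (k : Int) : List Int → Int → Int → Int
  | [], _, varieties => varieties
  | c :: rest, selected, varieties =>
      let selected' := selected + c
      let varieties' := varieties + 1
      if k ≤ selected' then varieties' else solLoopA k rest selected' varieties'

def solution (k : Int) (tangerine : List Int) : Int :=
  let count := PySem.Dict.counter tangerine
  let sorted_count := PySem.List.sorted count.values (fun x => x) true
  solLoopA k sorted_count 0 0

-- ===== PORT B =====
-- itertools.accumulate on an int list, ported by hand (exact: running sums, one output per element)
def accumB (s : Int) : List Int → List Int
  | [] => []
  | c :: rest => (s + c) :: accumB (s + c) rest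

def solution_alt (k : Int) (tangerine : List Int) : Int :=
  let pfx := accumB 0 (PySem.List.sorted (PySem.Dict.counter tangerine).values (fun x => x) true)
  min ((PySem.List.bisectLeft pfx k : Int) + 1) (pfx.length : Int)

-- ===== PRECONDITION & SPEC =====
def Spec_solution (k : Int) (tangerine : List Int) (out : Int) : Prop := out = solution_alt k tangerine
instance (k : Int) (tangerine : List Int) (out : Int) : Decidable (Spec_solution k tangerine out) := by unfold Spec_solution; infer_instance

-- ===== CLAIM (what is proved, stated in full; the proofs are below) =====
def Claim_equal_solution : Prop := ∀ (k : Int) (tangerine : List Int), Dom_solution k tangerine → Spec_solution k tangerine (solution k tangerine)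

-- ===== LEMMAS AND PROOFS =====

-- first index of p whose value is ≥ k (length of the "< k" prefix)
def idxGE (k : Int) : List Int → Nat
  | [] => 0
  | x :: xs => if x < k then idxGE k xs + 1 else 0

theorem idxGE_le (k : Int) (p : List Int) : idxGE k p ≤ p.length := by
  induction p with
  | nil => simp [idxGE]
  | cons x xs ih => simp only [idxGE, List.length_cons]; split <;> omega

theorem lt_of_lt_idxGE (k : Int) (p : List Int) :
    ∀ (j : Nat) (hj : j < p.length), j < idxGE k p → p[j] < k := by
  induction p with
  | nil => intro j hj; simp at hj
  | cons x xs ih =>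
      intro j hj hlt
      simp only [idxGE] at hlt
      by_cases hx : x < k
      · simp only [if_pos hx] at hlt
        cases j with
        | zero => simpa using hx
        | succ j' =>
            have := ih j' (by simpa using hj) (by omega)
            simpa using this
      · simp [if_neg hx] at hlt

theorem ge_at_idxGE (k : Int) (p : List Int) (h : idxGE k p < p.length) :
    k ≤ p[idxGE k p]'h := by
  induction p with
  | nil => simp at h
  | cons x xs ih =>
      by_cases hx : x < k
      · have hx' : idxGE k (x :: xs) = idxGE k xs + 1 := by simp [idxGE, hx]
        have h' : idxGE k xs < xs.length := by
          simpa [hx'] using h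
        have := ih h'
        simpa [hx'] using this
      · have hx' : idxGE k (x :: xs) = 0 := by simp [idxGE, hx]
        simp only [hx']
        simpa using not_lt.mp hx

-- bisectLeft computes idxGE on a sorted list
theorem bisectLeft_eq_idxGE (k : Int) (p : List Int)
    (hp : p.Pairwise (· ≤ ·)) : PySem.List.bisectLeft p k = idxGE k p := by
  obtain ⟨hle, hlt, hge⟩ := PySem.List.bisectLeft_spec p k hp
  set b := PySem.List.bisectLeft p k with hb
  rcases lt_trichotomy b (idxGE k p) with h | h | h
  · have hbl : b < p.length := lt_of_lt_of_le h (idxGE_le k p)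
    have h1 := lt_of_lt_idxGE k p b hbl h
    have h2 := hge b hbl le_rfl
    omega
  · exact h
  · have hil : idxGE k p < p.length := lt_of_lt_of_le h hle
    have h1 := ge_at_idxGE k p hil
    have h2 := hlt (idxGE k p) hil h
    omega

-- every element of accumB s l is ≥ s when l is nonnegative
theorem accumB_ge (s : Int) (l : List Int) (hl : ∀ x ∈ l, 0 ≤ x) :
    ∀ y ∈ accumB s l, s ≤ y := by
  induction l generalizing s with
  | nil => intro y hy; simp [accumB] at hy
  | cons c rest ih =>
      intro y hy
      have hc : 0 ≤ c := hl c (by simp)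
      simp only [accumB, List.mem_cons] at hy
      rcases hy with rfl | hy
      · omega
      · have := ih (s + c) (fun x hx => hl x (List.mem_cons_of_mem _ hx)) y hy
        omega

theorem accumB_pairwise (s : Int) (l : List Int) (hl : ∀ x ∈ l, 0 ≤ x) :
    (accumB s l).Pairwise (· ≤ ·) := by
  induction l generalizing s with
  | nil => simp [accumB]
  | cons c rest ih =>
      simp only [accumB, List.pairwise_cons]
      refine ⟨fun y hy => accumB_ge (s + c) rest (fun x hx => hl x (List.mem_cons_of_mem _ hx)) y hy,
        ih (s + c) (fun x hx => hl x (List.mem_cons_of_mem _ hx))⟩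

-- A's loop computes min(idxGE + 1, length) over the prefix sums
theorem solLoopA_eq (k : Int) (l : List Int) : ∀ (sel v : Int),
    solLoopA k l sel v = v + ((min (idxGE k (accumB sel l) + 1) (accumB sel l).length : Nat) : Int) := by
  induction l with
  | nil => intro sel v; simp [solLoopA, accumB, idxGE]
  | cons c rest ih =>
      intro sel v
      simp only [solLoopA, accumB, idxGE, List.length_cons]
      by_cases h : k ≤ sel + c
      · have : ¬ sel + c < k := not_lt.mpr h
        simp only [if_pos h, if_neg this]
        have h1 : min 1 ((accumB (sel + c) rest).length + 1) = 1 := by omega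
        rw [h1]; simp
      · have hlt : sel + c < k := not_le.mp h
        simp only [if_neg h, if_pos hlt]
        rw [ih (sel + c) (v + 1)]
        have : min (idxGE k (accumB (sel + c) rest) + 1 + 1) ((accumB (sel + c) rest).length + 1)
            = min (idxGE k (accumB (sel + c) rest) + 1) (accumB (sel + c) rest).length + 1 := by
          omega
        rw [this]
        push_cast
        ring

-- every value of Counter(xs) is a count of a member, hence ≥ 1 ≥ 0
theorem counter_values_nonneg (xs : List Int) :
    ∀ v ∈ (PySem.Dict.counter xs).values, (0 : Int) ≤ v := by
  intro v hv
  have hvals : (PySem.Dict.counter xs).values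
      = ((PySem.Set.ofList xs : List Int).map (fun k => ((xs.count k : Int)))) := by
    have h := PySem.Dict.items_counter (xs := xs)
    calc (PySem.Dict.counter xs).values
        = ((PySem.Dict.counter xs).items).map (·.2) := rfl
      _ = _ := by rw [h]; simp [List.map_map, Function.comp]
  rw [hvals] at hv
  simp only [List.mem_map] at hv
  obtain ⟨x, _, rfl⟩ := hv
  positivity

theorem solution_eq_alt (k : Int) (tangerine : List Int) :
    solution k tangerine = solution_alt k tangerine := by
  show solLoopA k (PySem.List.sorted (PySem.Dict.counter tangerine).values (fun x => x) true) 0 0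
      = min ((PySem.List.bisectLeft (accumB 0 (PySem.List.sorted (PySem.Dict.counter tangerine).values (fun x => x) true)) k : Int) + 1)
          ((accumB 0 (PySem.List.sorted (PySem.Dict.counter tangerine).values (fun x => x) true)).length : Int)
  set l := PySem.List.sorted (PySem.Dict.counter tangerine).values (fun x => x) true with hl
  have hnn : ∀ x ∈ l, (0 : Int) ≤ x := by
    intro x hx
    exact counter_values_nonneg tangerine x ((PySem.List.mem_sorted _ _ _ _).mp hx)
  have hpw := accumB_pairwise 0 l hnn
  rw [bisectLeft_eq_idxGE k (accumB 0 l) hpw, solLoopA_eq]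
  push_cast
  omega

-- ===== VERDICT (by name: the statement is the Claim_ definition above) =====
theorem solution_spec : Claim_equal_solution := by
  intro k tangerine _
  exact solution_eq_alt k tangerine
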